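-- pv_equiv track=rewrite | github.com/zenml-io/zenml | docs/lazydocs_generation.py | _is_module_ignored
-- ===== SOURCE A (Python) =====
-- from typing import Any, Callable, Dict, List, Optional
--
-- def _is_module_ignored(module_name: str, ignored_modules: List[str]) -> bool:
--     """Checks if a given module is ignored."""
--     if module_name.split(".")[-1].startswith("_"):
--         return True
--
--     for ignored_module in ignored_modules:
--         if module_name == ignored_module:
--             return True
--
--         # Check is module is subpackage of an ignored package
--         if module_name.startswith(ignored_module + "."):
--             return True
--
--     return False
-- ===== SOURCE B (Python) =====
-- def _is_module_ignored(module_name: str, ignored_modules: list) -> bool: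
--     """Checks if a given module is ignored (membership of each dotted ancestor prefix in a set of ignored names)."""
--     if module_name.split(".")[-1].startswith("_"):
--         return True
--     ignored = set(ignored_modules)
--     if module_name in ignored:
--         return True
--     for i, ch in enumerate(module_name):
--         if ch == "." and module_name[:i] in ignored:
--             return True
--     return False
-- ===== Notes on version B (the rewrite author's own statement) =====
-- stated objective: alternative
-- what changed: Instead of scanning ignored_modules and testing equality/startswith against each entry, B builds a set of ignored_modules once and tests module_name plus each dotted ancestor prefix of module_name for membership.
import Mathlib
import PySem

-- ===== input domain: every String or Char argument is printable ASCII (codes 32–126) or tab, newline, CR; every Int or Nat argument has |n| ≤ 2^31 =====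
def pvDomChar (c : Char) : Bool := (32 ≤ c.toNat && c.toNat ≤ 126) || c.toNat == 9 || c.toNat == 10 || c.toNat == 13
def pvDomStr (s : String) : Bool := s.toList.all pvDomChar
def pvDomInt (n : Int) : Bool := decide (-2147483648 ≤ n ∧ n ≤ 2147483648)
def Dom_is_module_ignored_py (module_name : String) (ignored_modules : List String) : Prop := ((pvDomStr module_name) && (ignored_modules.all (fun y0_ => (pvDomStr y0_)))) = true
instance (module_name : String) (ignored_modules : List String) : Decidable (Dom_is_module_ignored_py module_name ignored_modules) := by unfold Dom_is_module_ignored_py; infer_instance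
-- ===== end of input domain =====

-- B replaces A's linear scan of ignored_modules (equality + startswith per entry) with a set of
-- ignored_modules queried once for module_name and once per dotted ancestor prefix (objective: alternative).


-- ===== PORT A =====
-- the 'for ignored_module in ignored_modules' loop of A
def aLoop (cs : List Char) : List String → Bool
  | [] => false
  | ig :: rest =>
    if cs = ig.toList then true
    else if PySem.Chars.startswith cs (ig.toList ++ ['.']) then true
    else aLoop cs rest

def is_module_ignored_py (module_name : String) (ignored_modules : List String) : Bool :=
  -- module_name.split(".")[-1].startswith("_"); split(".") is never empty so [-1] never raises
  match PySem.List.pyGet? (PySem.Chars.splitOn module_name.toList ['.']) (-1) with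
  | none => false
  | some lastPart =>
    if PySem.Chars.startswith lastPart ['_'] then true
    else aLoop module_name.toList ignored_modules

-- ===== PORT B =====
-- 'for i, ch in enumerate(module_name): if ch == "." and module_name[:i] in ignored'
-- pre is the already-consumed prefix module_name[:i]
def bScan (ignored : PySem.Set String) : List Char → List Char → Bool
  | _, [] => false
  | pre, c :: rest =>
    if c = '.' && PySem.Set.contains ignored (String.ofList pre) then true
    else bScan ignored (pre ++ [c]) rest

def is_module_ignored_py_alt (module_name : String) (ignored_modules : List String) : Bool :=
  match PySem.List.pyGet? (PySem.Chars.splitOn module_name.toList ['.']) (-1) with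
  | none => false
  | some lastPart =>
    if PySem.Chars.startswith lastPart ['_'] then true
    else
      let ignored : PySem.Set String := PySem.Set.ofList ignored_modules
      if PySem.Set.contains ignored module_name then true
      else bScan ignored [] module_name.toList

-- ===== PRECONDITION & SPEC =====
def Spec_is_module_ignored_py (module_name : String) (ignored_modules : List String) (out : Bool) : Prop := out = is_module_ignored_py_alt module_name ignored_modules
instance (module_name : String) (ignored_modules : List String) (out : Bool) : Decidable (Spec_is_module_ignored_py module_name ignored_modules out) := by unfold Spec_is_module_ignored_py; infer_instance

-- ===== CLAIM (what is proved, stated in full; the proofs are below) =====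
def Claim_equal_is_module_ignored_py : Prop := ∀ (module_name : String) (ignored_modules : List String), Dom_is_module_ignored_py module_name ignored_modules → Spec_is_module_ignored_py module_name ignored_modules (is_module_ignored_py module_name ignored_modules)

-- ===== LEMMAS AND PROOFS =====

-- A's loop hits iff some ignored module equals the name or is a dotted ancestor of it
theorem aLoop_iff (cs : List Char) (ign : List String) :
    aLoop cs ign = true ↔ ∃ ig ∈ ign, cs = ig.toList ∨ (ig.toList ++ ['.']) <+: cs := by
  induction ign with
  | nil => simp [aLoop]
  | cons ig rest ih =>
    simp only [aLoop]
    split_ifs with h1 h2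
    · simp [h1]
    · simp only [PySem.Chars.startswith_iff] at h2
      simp [h2]
    · have h2' : ¬ (ig.toList ++ ['.']) <+: cs :=
        fun hc => h2 ((PySem.Chars.startswith_iff _ _).mpr hc)
      simp only [List.mem_cons, ih]
      constructor
      · rintro ⟨x, hx, hc⟩; exact ⟨x, Or.inr hx, hc⟩
      · rintro ⟨x, hx | hx, hc⟩
        · subst hx
          rcases hc with hc | hc
          · exact absurd hc h1
          · exact absurd hc h2'
        · exact ⟨x, hx, hc⟩

-- B's scan hits iff the name splits at some dot whose left part is in the set
theorem bScan_iff (ig : PySem.Set String) (pre suf : List Char) :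
    bScan ig pre suf = true ↔ ∃ p q, suf = p ++ '.' :: q ∧ String.ofList (pre ++ p) ∈ ig := by
  induction suf generalizing pre with
  | nil => simp [bScan]
  | cons c rest ih =>
    simp only [bScan]
    split_ifs with h
    · simp only [Bool.and_eq_true, decide_eq_true_eq, PySem.Set.contains_iff] at h
      obtain ⟨hc, hm⟩ := h
      subst hc
      exact iff_of_true rfl ⟨[], rest, rfl, by simpa using hm⟩
    · rw [ih]
      simp only [Bool.and_eq_true, decide_eq_true_eq, PySem.Set.contains_iff, not_and_or] at h
      constructor
      · rintro ⟨p, q, hs, hm⟩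
        exact ⟨c :: p, q, by simp [hs], by simpa using hm⟩
      · rintro ⟨p, q, hs, hm⟩
        cases p with
        | nil =>
          simp only [List.nil_append, List.cons.injEq] at hs
          exfalso
          rcases h with h | h
          · exact h hs.1
          · exact h (by simpa using hm)
        | cons c' p' =>
          simp only [List.cons_append, List.cons.injEq] at hs
          obtain ⟨hc, hrest⟩ := hs
          subst hc
          exact ⟨p', q, hrest, by simpa using hm⟩

-- appending "." to ig and asking for a prefix = splitting cs at a dot right after ig
theorem prefix_dot_iff (t cs : List Char) :
    (t ++ ['.']) <+: cs ↔ ∃ q, cs = t ++ '.' :: q := by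
  constructor
  · rintro ⟨r, hr⟩
    exact ⟨r, by simpa using hr.symm⟩
  · rintro ⟨q, hq⟩
    exact ⟨q, by simp [hq]⟩

theorem loops_eq (m : String) (ign : List String) :
    aLoop m.toList ign =
      (if PySem.Set.contains (PySem.Set.ofList ign) m = true then true
       else bScan (PySem.Set.ofList ign) [] m.toList) := by
  by_cases hm : PySem.Set.contains (PySem.Set.ofList ign) m = true
  · rw [if_pos hm]
    rw [PySem.Set.contains_iff, PySem.Set.mem_ofList] at hm
    exact (aLoop_iff _ _).mpr ⟨m, hm, Or.inl rfl⟩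
  · rw [if_neg hm]
    have hm' : m ∉ ign := fun h =>
      hm ((PySem.Set.contains_iff _ _).mpr ((PySem.Set.mem_ofList _ _).mpr h))
    rw [Bool.eq_iff_iff, aLoop_iff, bScan_iff]
    constructor
    · rintro ⟨ig, hig, hc | hc⟩
      · exfalso
        have : m = ig := by
          rw [← String.ofList_toList (s := m), hc, String.ofList_toList]
        exact hm' (this ▸ hig)
      · obtain ⟨q, hq⟩ := (prefix_dot_iff _ _).mp hc
        refine ⟨ig.toList, q, hq, ?_⟩
        rw [PySem.Set.mem_ofList]
        simpa [String.ofList_toList] using hig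
    · rintro ⟨p, q, hs, hmem⟩
      rw [PySem.Set.mem_ofList] at hmem
      refine ⟨String.ofList ([] ++ p), by simpa using hmem, Or.inr ?_⟩
      rw [prefix_dot_iff]
      exact ⟨q, by simpa [String.toList_ofList] using hs⟩

-- ===== VERDICT (by name: the statement is the Claim_ definition above) =====
theorem is_module_ignored_py_spec : Claim_equal_is_module_ignored_py := by
  intro m ign _
  unfold Spec_is_module_ignored_py is_module_ignored_py is_module_ignored_py_alt
  cases PySem.List.pyGet? (PySem.Chars.splitOn m.toList ['.']) (-1) with
  | none => rfl
  | some lastPart =>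
    simp only []
    split_ifs with h hc
    · rfl
    · rw [loops_eq, if_pos hc]
    · rw [loops_eq, if_neg hc]
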